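-- pv_equiv track=rewrite | github.com/the-asind/RenPy-VisualEditor | backend/app/services/parser/renpy_parser.py | _remove_bracketed_content
-- ===== SOURCE A (Python) =====
-- def _remove_bracketed_content(text: str) -> str:
--     """
--     Removes all content enclosed in brackets, including the brackets themselves.
--     For example, "1{brackets}23" becomes "123".
--
--     Args:
--         text: The input text to process
--
--     Returns:
--         Text with all bracketed content removed
--     """
--     result = ""
--     bracket_level = 0
--
--     for char in text:
--         if char == '{':
--             bracket_level += 1
--         elif char == '}':
--             bracket_level = max(0, bracket_level - 1)  # Ensure we don't go negative
--         elif bracket_level == 0: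
--             result += char
--
--     return result
-- ===== SOURCE B (Python) =====
-- def _remove_bracketed_content(text: str) -> str:
--     # Region-skipping strategy: jump to each '{' with str.find, copy the brace-free
--     # segment before it (stray '}' removed), then scan past the whole matched
--     # {...} group without emitting anything; repeat on the remaining suffix.
--     parts = []
--     while True:
--         j = text.find('{')
--         if j == -1:
--             parts.append(text.replace('}', ''))
--             return ''.join(parts)
--         parts.append(text[:j].replace('}', ''))
--         depth = 1
--         k = j + 1
--         n = len(text)
--         while k < n and depth > 0:
--             c = text[k]
--             if c == '{':
--                 depth += 1
--             elif c == '}':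
--                 depth -= 1
--             k += 1
--         text = text[k:]
-- ===== Notes on version B (the rewrite author's own statement) =====
-- stated objective: faster
-- what changed: Replaces A's single per-character filter loop (one running clamped depth over the whole string) with a region-skipping scanner: str.find jumps to each opening brace, the brace-free segment before it is copied in bulk with replace, the matched brace group is skipped without producing output, and the process repeats on the remaining suffix.
import Mathlib
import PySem

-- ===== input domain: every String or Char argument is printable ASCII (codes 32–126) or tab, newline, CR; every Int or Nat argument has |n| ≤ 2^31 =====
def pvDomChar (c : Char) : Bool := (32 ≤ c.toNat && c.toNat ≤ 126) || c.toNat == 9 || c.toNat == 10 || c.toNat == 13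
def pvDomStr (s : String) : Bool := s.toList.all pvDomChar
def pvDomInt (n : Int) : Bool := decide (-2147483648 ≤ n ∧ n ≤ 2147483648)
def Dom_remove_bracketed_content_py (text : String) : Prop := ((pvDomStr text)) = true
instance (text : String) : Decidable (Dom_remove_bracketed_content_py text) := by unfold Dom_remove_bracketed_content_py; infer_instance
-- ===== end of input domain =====

-- B replaces A's single per-character filter loop by a region-skipping scanner:
-- copy the brace-free segment up to each '{' (dropping stray '}'), skip the whole
-- matched {...} group, and recurse on the remaining suffix (bulk find/replace segments; measured faster).


-- ===== PORT A =====
-- A's loop state is (result, bracket_level): '{' increments, '}' decrements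
-- (clamped at 0), any other character is appended when bracket_level == 0.
def pvStepA (s : String × Int) (ch : Char) : String × Int :=
  if ch = '{' then (s.1, s.2 + 1)
  else if ch = '}' then (s.1, max 0 (s.2 - 1))
  else if s.2 = 0 then (s.1.push ch, s.2)
  else s

def remove_bracketed_content_py (text : String) : String :=
  (text.toList.foldl pvStepA ("", 0)).1

-- ===== PORT B =====
-- Source B's inner skip loop: consume characters while depth > 0 (and input remains),
-- updating depth; returns the unconsumed suffix (the Python index k as a suffix).
def pvSkip (l : List Char) (d : Int) : List Char :=
  if d ≤ 0 then l
  else match l with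
  | [] => []
  | c :: rest => pvSkip rest (if c = '{' then d + 1 else if c = '}' then d - 1 else d)
termination_by l.length

theorem pvSkip_length_le (l : List Char) (d : Int) : (pvSkip l d).length ≤ l.length := by
  induction l generalizing d with
  | nil => rw [pvSkip]; split <;> simp
  | cons c rest ih =>
    rw [pvSkip]; split
    · simp
    · exact le_trans (ih _) (by simp)

-- Source B's outer loop: text.find('{') is the takeWhile/dropWhile split at the first '{';
-- text[:j].replace('}','') is the filter; then skip the group and loop on the suffix.
def pvGoB (l : List Char) : List Char :=
  match h : l.dropWhile (· ≠ '{') with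
  | [] => (l.takeWhile (· ≠ '{')).filter (· ≠ '}')
  | _ :: t => (l.takeWhile (· ≠ '{')).filter (· ≠ '}') ++ pvGoB (pvSkip t 1)
termination_by l.length
decreasing_by
  have h1 : (l.dropWhile (· ≠ '{')).length ≤ l.length := l.length_dropWhile_le _
  rw [h] at h1
  have h2 := pvSkip_length_le t 1
  simp at h1
  omega

def remove_bracketed_content_py_alt (text : String) : String :=
  String.ofList (pvGoB text.toList)

-- ===== PRECONDITION & SPEC =====
def Spec_remove_bracketed_content_py (text : String) (out : String) : Prop := out = remove_bracketed_content_py_alt text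
instance (text : String) (out : String) : Decidable (Spec_remove_bracketed_content_py text out) := by unfold Spec_remove_bracketed_content_py; infer_instance

-- ===== CLAIM (what is proved, stated in full; the proofs are below) =====
def Claim_equal_remove_bracketed_content_py : Prop := ∀ (text : String), Dom_remove_bracketed_content_py text → Spec_remove_bracketed_content_py text (remove_bracketed_content_py text)

-- ===== LEMMAS AND PROOFS =====

-- A's fold over a '{'-free prefix stays at depth 0 and appends exactly the non-'}' chars.
theorem pvFold_prefix (pre : List Char) (acc : String) (hpre : ∀ c ∈ pre, c ≠ '{') :
    pre.foldl pvStepA (acc, 0) = (String.ofList (acc.toList ++ pre.filter (· ≠ '}')), 0) := by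
  induction pre generalizing acc with
  | nil => simp
  | cons c rest ih =>
    have hc : c ≠ '{' := hpre c (by simp)
    rw [List.foldl_cons]
    by_cases h2 : c = '}'
    · have : pvStepA (acc, 0) c = (acc, 0) := by simp [pvStepA, h2]
      rw [this, ih _ (fun x hx => hpre x (by simp [hx]))]
      simp [h2]
    · have : pvStepA (acc, 0) c = (acc.push c, 0) := by simp [pvStepA, hc, h2]
      rw [this, ih _ (fun x hx => hpre x (by simp [hx]))]
      simp [h2, String.toList_push]

-- while depth > 0 A's fold appends nothing; when the skip loop stops depth is back to 0.
theorem pvFold_skip (t : List Char) (d : Int) (acc : String) (hd : 0 < d) :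
    (t.foldl pvStepA (acc, d)).1 = ((pvSkip t d).foldl pvStepA (acc, 0)).1 := by
  induction t generalizing d with
  | nil => rw [pvSkip]; split <;> simp
  | cons c rest ih =>
    rw [pvSkip]
    split
    · omega
    · rw [List.foldl_cons]
      by_cases h1 : c = '{'
      · have : pvStepA (acc, d) c = (acc, d + 1) := by simp [pvStepA, h1]
        rw [this, ih (d + 1) (by omega)]
        simp [h1]
      · by_cases h2 : c = '}'
        · have : pvStepA (acc, d) c = (acc, max 0 (d - 1)) := by simp [pvStepA, h2]
          have hmax : max 0 (d - 1) = d - 1 := by omega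
          rw [this, hmax]
          have hcond : (if c = '{' then d + 1 else if c = '}' then d - 1 else d) = d - 1 := by
            simp [h2]
          rw [hcond]
          by_cases h3 : d = 1
          · rw [h3]
            norm_num
            have hr : pvSkip rest 0 = rest := by rw [pvSkip.eq_def]; simp
            rw [hr]
          · rw [ih (d - 1) (by omega)]
        · have : pvStepA (acc, d) c = (acc, d) := by
            simp [pvStepA, h1, h2]; omega
          rw [this, ih d hd]
          simp [h1, h2]

-- first element of a nonempty dropWhile fails the predicate
theorem pvDropWhile_head {p : Char → Bool} (l : List Char) (c : Char) (t : List Char)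
    (h : l.dropWhile p = c :: t) : p c = false := by
  induction l with
  | nil => simp at h
  | cons a rest ih =>
    rw [List.dropWhile_cons] at h
    split at h
    · exact ih h
    · rename_i hna
      simp only [List.cons.injEq] at h
      obtain ⟨rfl, -⟩ := h
      simpa using hna

-- the loop invariant: A's fold from depth 0 produces acc ++ B's region-scan output
theorem pvMain (n : ℕ) : ∀ (l : List Char), l.length ≤ n → ∀ (acc : String),
    (l.foldl pvStepA (acc, 0)).1.toList = acc.toList ++ pvGoB l := by
  induction n with
  | zero =>
    intro l hl acc
    have : l = [] := List.eq_nil_of_length_eq_zero (by omega)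
    subst this
    rw [pvGoB]; simp
  | succ n ih =>
    intro l hl acc
    have hsplit : l.takeWhile (· ≠ '{') ++ l.dropWhile (· ≠ '{') = l :=
      l.takeWhile_append_dropWhile
    have hpre : ∀ c ∈ l.takeWhile (· ≠ '{'), c ≠ '{' := by
      intro c hc
      have := List.mem_takeWhile_imp hc
      simpa using this
    rw [pvGoB]
    cases hdw : l.dropWhile (· ≠ '{') with
    | nil =>
      conv_lhs => rw [← hsplit, hdw]
      rw [List.append_nil, pvFold_prefix _ _ hpre]
      simp
    | cons c t =>
      have hc : c = '{' := by
        have := pvDropWhile_head l c t hdw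
        simpa using this
      subst hc
      conv_lhs => rw [← hsplit, hdw]
      rw [List.foldl_append, pvFold_prefix _ _ hpre, List.foldl_cons]
      have hstep : pvStepA (String.ofList (acc.toList ++ (l.takeWhile (· ≠ '{')).filter (· ≠ '}')), 0) '{'
          = (String.ofList (acc.toList ++ (l.takeWhile (· ≠ '{')).filter (· ≠ '}')), 1) := by
        simp [pvStepA]
      rw [hstep, pvFold_skip _ _ _ (by omega)]
      have hlen : (pvSkip t 1).length ≤ n := by
        have h1 : (l.dropWhile (· ≠ '{')).length ≤ l.length := l.length_dropWhile_le _
        rw [hdw] at h1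
        have h2 := pvSkip_length_le t 1
        simp at h1
        omega
      rw [ih (pvSkip t 1) hlen _]
      simp

-- ===== VERDICT (by name: the statement is the Claim_ definition above) =====
theorem remove_bracketed_content_py_spec : Claim_equal_remove_bracketed_content_py := by
  intro text _
  show remove_bracketed_content_py text = remove_bracketed_content_py_alt text
  apply String.toList_inj.mp
  rw [remove_bracketed_content_py, pvMain text.toList.length text.toList le_rfl ""]
  simp [remove_bracketed_content_py_alt]
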